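-- pv_equiv track=rewrite | github.com/rafaelpadilla/DeepLearning_VDAO | VDAO_Access/utils.py | splitPaths
-- ===== SOURCE A (Python) =====
-- def splitPaths(path):
--     folders = []
--     indexes = [i for i, letter in enumerate(path) if letter == '/']
--     for i in range(len(indexes)):
--         if i+1 < len(indexes):
--             item = path[indexes[i]:indexes[i+1]]
--         else:
--             item = path[indexes[i]:]
--         item = item.replace('/','')
--         if item != '':
--             folders.append(item)
--     return folders
-- ===== SOURCE B (Python) =====
-- def splitPaths(path):
--     # library split on the separator; drop the head element (the text before the
--     # first separator, which the original discards) and keep only non-empty parts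
--     return [p for p in path.split('/')[1:] if p]
-- ===== Notes on version B (the rewrite author's own statement) =====
-- stated objective: simpler
-- what changed: Replaced the manual slash-index scan with per-segment slicing and slash-removal by a single library split on the separator, dropping the head element and filtering out empty parts.
import Mathlib
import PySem

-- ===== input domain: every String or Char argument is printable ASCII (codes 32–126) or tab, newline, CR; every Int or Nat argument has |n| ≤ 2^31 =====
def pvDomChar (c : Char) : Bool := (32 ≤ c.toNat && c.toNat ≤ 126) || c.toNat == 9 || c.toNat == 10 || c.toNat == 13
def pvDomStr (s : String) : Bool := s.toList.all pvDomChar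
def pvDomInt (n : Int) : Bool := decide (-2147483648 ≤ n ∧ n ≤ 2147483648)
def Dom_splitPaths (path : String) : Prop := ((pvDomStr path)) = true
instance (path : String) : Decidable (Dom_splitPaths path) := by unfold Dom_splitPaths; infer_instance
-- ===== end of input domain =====

-- B replaces A's manual slash-index scan with per-pair slicing and slash-removal by one
-- library split on the separator, dropping the head element and filtering empty parts (simpler).

-- ===== PORT A =====
def splitPaths (path : String) : List String :=
  let cs := path.toList
  let indexes : List Int :=
    ((PySem.List.enumerate cs 0).filter (fun p => p.2 == '/')).map (fun p => p.1)
  (PySem.List.pyRange 0 (indexes.length : Int) 1).foldl (fun folders i =>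
      let item : List Char :=
        if i + 1 < (indexes.length : Int) then
          PySem.List.slice cs (some (PySem.List.pyGetD indexes i 0)) (some (PySem.List.pyGetD indexes (i+1) 0))
        else
          PySem.List.slice cs (some (PySem.List.pyGetD indexes i 0)) none
      let item2 := PySem.Chars.replace item ['/'] []
      if item2.isEmpty then folders else folders ++ [String.ofList item2]) []

-- ===== PORT B =====
def splitPaths_alt (path : String) : List String :=
  let parts := PySem.Chars.splitOn path.toList ['/']
  ((parts.drop 1).filter (fun p => !p.isEmpty)).map String.ofList

-- ===== PRECONDITION & SPEC =====
def Spec_splitPaths (path : String) (out : List String) : Prop := out = splitPaths_alt path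
instance (path : String) (out : List String) : Decidable (Spec_splitPaths path out) := by unfold Spec_splitPaths; infer_instance

-- ===== CLAIM (what is proved, stated in full; the proofs are below) =====
def Claim_equal_splitPaths : Prop := ∀ (path : String), Dom_splitPaths path → Spec_splitPaths path (splitPaths path)

-- ===== LEMMAS AND PROOFS =====

theorem pvReplaceGo (fuel : Nat) (l acc : List Char) (h : l.length ≤ fuel) :
    PySem.Chars.replace.go ['/'] [] fuel l acc
      = acc.reverse ++ l.filter (fun c => !(c == '/')) := by
  induction fuel generalizing l acc with
  | zero =>
    have : l = [] := by cases l <;> simp_all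
    subst this; simp [PySem.Chars.replace.go]
  | succ n ih =>
    cases l with
    | nil => simp [PySem.Chars.replace.go]
    | cons c t =>
      by_cases hc : c = '/'
      · subst hc
        simp only [PySem.Chars.replace.go, List.isPrefixOf, Bool.and_true, beq_self_eq_true, if_true]
        rw [show List.drop (['/'] : List Char).length ('/' :: t) = t from rfl]
        rw [ih t _ (by simpa using h)]
        simp
      · have hb : ('/' == c) = false := by simp [Ne.symm hc]
        simp only [PySem.Chars.replace.go, List.isPrefixOf, Bool.and_true, hb, if_false]
        rw [ih t _ (by simpa using h)]
        have hb2 : (c == '/') = false := by simp [hc]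
        simp [hb2]

theorem pvReplace_eq_filter (l : List Char) :
    PySem.Chars.replace l ['/'] [] = l.filter (fun c => !(c == '/')) := by
  rw [show PySem.Chars.replace l ['/'] [] = PySem.Chars.replace.go ['/'] [] l.length l [] from rfl]
  simpa using pvReplaceGo l.length l [] le_rfl

def pvSegs : List Char → List (List Char)
  | [] => [[]]
  | c :: t =>
      if c == '/' then [] :: pvSegs t
      else match pvSegs t with
        | [] => [[c]]
        | s :: r => (c :: s) :: r

def pvConsHead (p : List Char) : List (List Char) → List (List Char)
  | [] => [p]
  | s :: r => (p ++ s) :: r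

theorem pvSegs_ne_nil (cs : List Char) : pvSegs cs ≠ [] := by
  cases cs with
  | nil => simp [pvSegs]
  | cons c t =>
    simp only [pvSegs]
    split
    · simp
    · split <;> simp_all

theorem pvSplitGo (fuel : Nat) (l cur : List Char) (acc : List (List Char)) (h : l.length ≤ fuel) :
    PySem.Chars.splitOn.go ['/'] fuel l cur acc
      = acc.reverse ++ pvConsHead cur.reverse (pvSegs l) := by
  induction fuel generalizing l cur acc with
  | zero =>
    have : l = [] := by cases l <;> simp_all
    subst this; simp [PySem.Chars.splitOn.go, pvSegs, pvConsHead]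
  | succ n ih =>
    cases l with
    | nil => simp [PySem.Chars.splitOn.go, pvSegs, pvConsHead]
    | cons c t =>
      by_cases hc : c = '/'
      · subst hc
        simp only [PySem.Chars.splitOn.go, List.isPrefixOf, Bool.and_true, beq_self_eq_true, if_true]
        rw [show List.drop (['/'] : List Char).length ('/' :: t) = t from rfl]
        rw [ih t [] _ (by simpa using h)]
        obtain ⟨s, r, hs⟩ : ∃ s r, pvSegs t = s :: r := by
          cases hseg : pvSegs t with
          | nil => exact absurd hseg (pvSegs_ne_nil t)
          | cons s r => exact ⟨s, r, rfl⟩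
        simp [pvSegs, hs, pvConsHead]
      · have hb : ('/' == c) = false := by simp [Ne.symm hc]
        simp only [PySem.Chars.splitOn.go, List.isPrefixOf, Bool.and_true, hb]
        rw [ih t (c :: cur) acc (by simpa using h)]
        have hb2 : (c == '/') = false := by simp [hc]
        obtain ⟨s, r, hs⟩ : ∃ s r, pvSegs t = s :: r := by
          cases hseg : pvSegs t with
          | nil => exact absurd hseg (pvSegs_ne_nil t)
          | cons s r => exact ⟨s, r, rfl⟩
        simp [pvSegs, hb2, hs, pvConsHead]

theorem pvSplit_eq_segs (l : List Char) :
    PySem.Chars.splitOn l ['/'] = pvSegs l := by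
  rw [show PySem.Chars.splitOn l ['/'] = PySem.Chars.splitOn.go ['/'] (l.length + 1) l [] [] from rfl]
  rw [pvSplitGo _ _ _ _ (by omega)]
  obtain ⟨s, r, hs⟩ : ∃ s r, pvSegs l = s :: r := by
    cases hseg : pvSegs l with
    | nil => exact absurd hseg (pvSegs_ne_nil l)
    | cons s r => exact ⟨s, r, rfl⟩
  simp [hs, pvConsHead]

def pvIdxs (cs : List Char) : List Int :=
  ((PySem.List.enumerate cs 0).filter (fun p => p.2 == '/')).map (fun p => p.1)

theorem pvEnumShift (xs : List Char) (s : Int) :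
    ((PySem.List.enumerate xs s).filter (fun p => p.2 == '/')).map (fun p => p.1)
      = (((PySem.List.enumerate xs 0).filter (fun p => p.2 == '/')).map (fun p => p.1)).map (· + s) := by
  induction xs generalizing s with
  | nil => simp [PySem.List.enumerate_nil]
  | cons c t ih =>
    simp only [PySem.List.enumerate_cons]
    by_cases hc : (c == '/') = true
    · simp only [List.filter_cons, hc, if_true, List.map_cons, zero_add]
      rw [ih (s+1), ih 1]
      simp only [List.map_map, List.cons.injEq]
      refine ⟨by trivial, List.map_congr_left fun a _ => by simp; omega⟩
    · simp only [List.filter_cons, hc, Bool.false_eq_true, if_false, zero_add]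
      rw [ih (s+1), ih 1]
      simp only [List.map_map]
      exact List.map_congr_left fun a _ => by simp; omega

theorem pvIdxs_cons (c : Char) (t : List Char) :
    pvIdxs (c :: t) = if c == '/' then 0 :: (pvIdxs t).map (· + 1) else (pvIdxs t).map (· + 1) := by
  unfold pvIdxs
  simp only [PySem.List.enumerate_cons, List.filter_cons, zero_add]
  by_cases hc : (c == '/') = true
  · simp only [hc, if_true, List.map_cons, zero_add]
    rw [pvEnumShift t 1]
  · simp only [hc, Bool.false_eq_true, if_false, zero_add]
    rw [pvEnumShift t 1]

theorem pvIdxs_nonneg (cs : List Char) : ∀ x ∈ pvIdxs cs, 0 ≤ x := by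
  induction cs with
  | nil => simp [pvIdxs, PySem.List.enumerate_nil]
  | cons c t ih =>
    intro x hx
    rw [pvIdxs_cons] at hx
    by_cases hc : (c == '/') = true
    · rw [if_pos hc] at hx
      rcases List.mem_cons.mp hx with rfl | hx
      · omega
      · obtain ⟨a, ha, rfl⟩ := List.mem_map.mp hx
        have := ih a ha; omega
    · rw [if_neg hc] at hx
      obtain ⟨a, ha, rfl⟩ := List.mem_map.mp hx
      have := ih a ha; omega

theorem pvIdxs_nil_iff (cs : List Char) : pvIdxs cs = [] ↔ '/' ∉ cs := by
  induction cs with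
  | nil => simp [pvIdxs, PySem.List.enumerate_nil]
  | cons c t ih =>
    rw [pvIdxs_cons]
    by_cases hc : c = '/'
    · subst hc; simp
    · have hb : (c == '/') = false := by simp [hc]
      simp [hb, ih, Ne.symm hc]

theorem pvIdxs_head (cs : List Char) (j : Int) (r : List Int) (h : pvIdxs cs = j :: r) :
    ∃ m : Nat, j = (m : Int) ∧ cs.take m = cs.takeWhile (fun c => !(c == '/')) := by
  induction cs generalizing j r with
  | nil => simp [pvIdxs, PySem.List.enumerate_nil] at h
  | cons c t ih =>
    rw [pvIdxs_cons] at h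
    by_cases hc : c = '/'
    · subst hc
      simp only [beq_self_eq_true, if_true, List.cons.injEq] at h
      exact ⟨0, h.1.symm, by simp [List.takeWhile_cons]⟩
    · have hb : (c == '/') = false := by simp [hc]
      simp only [hb, if_false] at h
      cases ht : pvIdxs t with
      | nil => rw [ht] at h; simp at h
      | cons j' r' =>
        rw [ht] at h
        simp only [List.map_cons, List.cons.injEq] at h
        obtain ⟨h1, h2⟩ := h
        obtain ⟨m', hm', htake⟩ := ih j' r' ht
        refine ⟨m' + 1, by push_cast; omega, ?_⟩
        simp [List.takeWhile_cons, hb, htake]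

def pvItem (cs : List Char) (a : Int) (b? : Option Int) : List Char :=
  PySem.Chars.replace (PySem.List.slice cs (some a) b?) ['/'] []

def pvPairs (cs : List Char) : List Int → List String
  | [] => []
  | [a] =>
      let it := pvItem cs a none
      if it.isEmpty then [] else [String.ofList it]
  | a :: b :: r =>
      (let it := pvItem cs a (some b)
       if it.isEmpty then [] else [String.ofList it]) ++ pvPairs cs (b :: r)

theorem pvLoopNat (cs : List Char) (I : List Int) (acc : List String) :
    (List.range I.length).foldl (fun folders (k : Nat) =>
      let i : Int := (k : Int)
      let item : List Char :=
        if i + 1 < (I.length : Int) then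
          PySem.List.slice cs (some (PySem.List.pyGetD I i 0)) (some (PySem.List.pyGetD I (i+1) 0))
        else
          PySem.List.slice cs (some (PySem.List.pyGetD I i 0)) none
      let item2 := PySem.Chars.replace item ['/'] []
      if item2.isEmpty then folders else folders ++ [String.ofList item2]) acc
    = acc ++ pvPairs cs I := by
  induction I generalizing acc with
  | nil => simp [pvPairs]
  | cons a I' ih =>
    rw [show (a :: I').length = I'.length + 1 from rfl, List.range_succ_eq_map, List.foldl_cons,
        List.foldl_map]
    have hcong := PySem.List.foldl_congr_mem (List.range I'.length)
      (fun folders (k : Nat) =>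
        let i : Int := ((Nat.succ k : Nat) : Int)
        let item : List Char :=
          if i + 1 < ((I'.length + 1 : Nat) : Int) then
            PySem.List.slice cs (some (PySem.List.pyGetD (a :: I') i 0)) (some (PySem.List.pyGetD (a :: I') (i+1) 0))
          else
            PySem.List.slice cs (some (PySem.List.pyGetD (a :: I') i 0)) none
        let item2 := PySem.Chars.replace item ['/'] []
        if item2.isEmpty then folders else folders ++ [String.ofList item2])
      (fun folders (k : Nat) =>
        let i : Int := (k : Int)
        let item : List Char :=
          if i + 1 < (I'.length : Int) then
            PySem.List.slice cs (some (PySem.List.pyGetD I' i 0)) (some (PySem.List.pyGetD I' (i+1) 0))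
          else
            PySem.List.slice cs (some (PySem.List.pyGetD I' i 0)) none
        let item2 := PySem.Chars.replace item ['/'] []
        if item2.isEmpty then folders else folders ++ [String.ofList item2])
      (let i : Int := ((0:Nat) : Int)
       let item : List Char :=
         if i + 1 < ((I'.length + 1 : Nat) : Int) then
           PySem.List.slice cs (some (PySem.List.pyGetD (a :: I') i 0)) (some (PySem.List.pyGetD (a :: I') (i+1) 0))
         else
           PySem.List.slice cs (some (PySem.List.pyGetD (a :: I') i 0)) none
       let item2 := PySem.Chars.replace item ['/'] []
       if item2.isEmpty then acc else acc ++ [String.ofList item2])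
      (by
        intro b k _
        simp only []
        have e1 : ((Nat.succ k : Nat) : Int) = (k : Int) + 1 := by push_cast; ring
        have e2 : ((Nat.succ k : Nat) : Int) + 1 = ((k + 2 : Nat) : Int) := by push_cast; ring
        have g1 : PySem.List.pyGetD (a :: I') ((Nat.succ k : Nat) : Int) 0 = PySem.List.pyGetD I' ((k : Nat) : Int) 0 := by
          rw [PySem.List.pyGetD_natCast, PySem.List.pyGetD_natCast]; rfl
        have g2 : PySem.List.pyGetD (a :: I') (((Nat.succ k : Nat) : Int) + 1) 0 = PySem.List.pyGetD I' (((k : Nat) : Int) + 1) 0 := by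
          rw [e2, PySem.List.pyGetD_natCast]
          rw [show ((k : Nat) : Int) + 1 = ((k + 1 : Nat) : Int) by push_cast; ring, PySem.List.pyGetD_natCast]
          rfl
        have hc : (((Nat.succ k : Nat) : Int) + 1 < ((I'.length + 1 : Nat) : Int)) ↔ (((k : Nat) : Int) + 1 < (I'.length : Int)) := by
          push_cast; omega
        simp only [g1, g2, hc])
    -- first iteration then IH on the tail
    rw [hcong, ih]
    clear hcong
    cases I' with
    | nil =>
      simp only [pvPairs, pvItem, List.length_nil, List.range_zero, List.foldl_nil]
      have hcond : ¬ ((((0:Nat)) : Int) + 1 < ((0 + 1 : Nat) : Int)) := by decide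
      rw [if_neg hcond, show PySem.List.pyGetD [a] (((0:Nat)) : Int) 0 = a from by
        rw [PySem.List.pyGetD_natCast]; rfl]
      split <;> simp
    | cons b r =>
      simp only [pvPairs, pvItem]
      have hcond : (((0:Nat)) : Int) + 1 < (((b :: r).length + 1 : Nat) : Int) := by
        have h0 : (0:Nat) + 1 < (b :: r).length + 1 := by simp
        exact_mod_cast h0
      rw [if_pos hcond,
          show PySem.List.pyGetD (a :: b :: r) (((0:Nat)) : Int) 0 = a from by
            rw [PySem.List.pyGetD_natCast]; rfl,
          show (((0:Nat)) : Int) + 1 = ((1:Nat) : Int) from rfl,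
          show PySem.List.pyGetD (a :: b :: r) (((1:Nat)) : Int) 0 = b from by
            rw [PySem.List.pyGetD_natCast]; rfl]
      split <;> simp

theorem pvPairs_shift (c : Char) (t : List Char) (I : List Int) (h : ∀ x ∈ I, 0 ≤ x) :
    pvPairs (c :: t) (I.map (· + 1)) = pvPairs t I := by
  induction I with
  | nil => rfl
  | cons a I' ih =>
    obtain ⟨m, hm⟩ := Int.eq_ofNat_of_zero_le (h a (List.mem_cons_self))
    subst hm
    cases I' with
    | nil =>
      simp only [List.map_cons, List.map_nil, pvPairs, pvItem]
      rw [show ((m:Int) + 1) = ((m+1 : Nat) : Int) by push_cast; ring,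
          PySem.List.slice_from_natCast, PySem.List.slice_from_natCast,
          List.drop_succ_cons]
    | cons b r =>
      obtain ⟨k, hk⟩ := Int.eq_ofNat_of_zero_le (h b (List.mem_cons_of_mem _ List.mem_cons_self))
      subst hk
      have htail := ih (fun x hx => h x (List.mem_cons_of_mem _ hx))
      simp only [List.map_cons] at htail ⊢
      simp only [pvPairs, pvItem]
      rw [htail]
      congr 1
      rw [show ((m:Int) + 1) = ((m+1 : Nat) : Int) by push_cast; ring,
          show ((k:Int) + 1) = ((k+1 : Nat) : Int) by push_cast; ring,
          PySem.List.slice_natCast, PySem.List.slice_natCast,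
          List.drop_succ_cons, Nat.succ_sub_succ]

theorem pvSegs_noslash (t : List Char) (h : '/' ∉ t) : pvSegs t = [t] := by
  induction t with
  | nil => rfl
  | cons c t ih =>
    have hc : (c == '/') = false := by
      simp only [List.mem_cons, not_or] at h
      simp [Ne.symm h.1]
    simp only [pvSegs, hc, Bool.false_eq_true, if_false]
    rw [ih (fun hh => h (List.mem_cons_of_mem _ hh))]

theorem pvFilter_noslash (t : List Char) (h : '/' ∉ t) :
    t.filter (fun c => !(c == '/')) = t := by
  rw [List.filter_eq_self]
  intro a ha
  simp only [Bool.not_eq_eq_eq_not, Bool.not_true, beq_eq_false_iff_ne, ne_eq]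
  exact fun hh => h (hh ▸ ha)

theorem pvTake_filter (t : List Char) (m : Nat)
    (htake : t.take m = t.takeWhile (fun c => !(c == '/'))) :
    (t.take m).filter (fun c => !(c == '/')) = t.take m := by
  rw [List.filter_eq_self]
  intro a ha
  rw [htake] at ha
  simpa using List.mem_takeWhile_imp ha

theorem pvSegs_head (cs : List Char) :
    ∃ r, pvSegs cs = (cs.takeWhile (fun c => !(c == '/'))) :: r := by
  induction cs with
  | nil => exact ⟨[], rfl⟩
  | cons c t ih =>
    obtain ⟨r, hr⟩ := ih
    by_cases hc : c = '/'
    · subst hc; exact ⟨pvSegs t, by simp [pvSegs, List.takeWhile_cons]⟩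
    · have hb : (c == '/') = false := by simp [hc]
      refine ⟨r, ?_⟩
      simp only [pvSegs, hb, Bool.false_eq_true, if_false, hr, List.takeWhile_cons, Bool.not_false]
      simp [hb]

theorem pvMain (cs : List Char) :
    pvPairs cs (pvIdxs cs)
      = (((pvSegs cs).tail).filter (fun p => !p.isEmpty)).map String.ofList := by
  induction cs with
  | nil => rfl
  | cons c t ih =>
    rw [pvIdxs_cons]
    by_cases hc : c = '/'
    · subst hc
      simp only [beq_self_eq_true, if_true]
      rw [show pvSegs ('/' :: t) = [] :: pvSegs t from by simp [pvSegs], List.tail_cons]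
      cases ht : pvIdxs t with
      | nil =>
        have hns : '/' ∉ t := (pvIdxs_nil_iff t).mp ht
        rw [pvSegs_noslash t hns]
        simp only [List.map_nil, pvPairs, pvItem]
        rw [show PySem.List.slice ('/' :: t) (some (0:Int)) none = '/' :: t from by
          simp [pysem]]
        rw [pvReplace_eq_filter]
        simp only [List.filter_cons, show ((!('/' == '/')) = false) from rfl]
        rw [pvFilter_noslash t hns]
        by_cases hemp : t = []
        · subst hemp; simp
        · simp [hemp, List.isEmpty_iff]
      | cons j r =>
        obtain ⟨m, hm, htake⟩ := pvIdxs_head t j r ht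
        subst hm
        obtain ⟨rest, hseg⟩ := pvSegs_head t
        have hnn := pvIdxs_nonneg t
        rw [ht] at hnn
        simp only [List.map_cons, pvPairs, pvItem]
        have hshift : pvPairs ('/' :: t) (((m:Int) + 1) :: (List.map (fun x => x + 1) r))
            = pvPairs t ((m:Int) :: r) := by
          have := pvPairs_shift '/' t ((m:Int) :: r) hnn
          simpa only [List.map_cons] using this
        rw [hshift, ← ht, ih, hseg, List.tail_cons]
        rw [show PySem.List.slice ('/' :: t) (some (0:Int)) (some ((m:Int) + 1))
              = '/' :: t.take m from by
          rw [show ((m:Int) + 1) = ((m+1 : Nat) : Int) by push_cast; ring]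
          rw [PySem.List.slice_zero_start, PySem.List.slice_to_natCast, List.take_succ_cons]]
        rw [pvReplace_eq_filter]
        simp only [List.filter_cons, show ((!('/' == '/')) = false) from rfl]
        rw [pvTake_filter t m htake, htake]
        cases hemp : (t.takeWhile (fun c => !(c == '/'))).isEmpty with
        | true => simp [List.filter_cons, hemp]
        | false => simp [List.filter_cons, hemp]
    · have hb : (c == '/') = false := by simp [hc]
      simp only [hb, Bool.false_eq_true, if_false]
      rw [pvPairs_shift c t (pvIdxs t) (pvIdxs_nonneg t), ih]
      obtain ⟨s', r', hs⟩ : ∃ s' r', pvSegs t = s' :: r' := by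
        cases hseg : pvSegs t with
        | nil => exact absurd hseg (pvSegs_ne_nil t)
        | cons s' r' => exact ⟨s', r', rfl⟩
      rw [show pvSegs (c :: t) = (c :: s') :: r' from by simp [pvSegs, hb, hs], List.tail_cons,
          hs, List.tail_cons]

theorem pvFinal (path : String) : splitPaths path = splitPaths_alt path := by
  show (PySem.List.pyRange 0 ((pvIdxs path.toList).length : Int) 1).foldl (fun folders i =>
      let item : List Char :=
        if i + 1 < ((pvIdxs path.toList).length : Int) then
          PySem.List.slice path.toList (some (PySem.List.pyGetD (pvIdxs path.toList) i 0)) (some (PySem.List.pyGetD (pvIdxs path.toList) (i+1) 0))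
        else
          PySem.List.slice path.toList (some (PySem.List.pyGetD (pvIdxs path.toList) i 0)) none
      let item2 := PySem.Chars.replace item ['/'] []
      if item2.isEmpty then folders else folders ++ [String.ofList item2]) []
    = ((PySem.Chars.splitOn path.toList ['/']).drop 1 |>.filter (fun p => !p.isEmpty)).map String.ofList
  rw [PySem.List.pyRange_zero_natCast, List.foldl_map]
  refine Eq.trans (pvLoopNat path.toList (pvIdxs path.toList) []) ?_
  simp only [List.nil_append]
  rw [pvMain, pvSplit_eq_segs, List.drop_one]

-- ===== VERDICT (by name: the statement is the Claim_ definition above) =====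
theorem splitPaths_spec : Claim_equal_splitPaths := by
  intro path _
  exact pvFinal path
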